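-- pv_equiv track=rewrite | github.com/Nithin1729S/NITK-IT-2026-Assignments | CS101 - Python Programming Lab/A21_InventoryDict.py | decrement_items
-- ===== SOURCE A (Python) =====
-- def decrement_items(dct1,lst):
--         dct2 = {i: -lst.count(i) for i in lst}
--
--         ini_dict=[dct1,dct2]
--         result={k:sum(d[k] for d in ini_dict if k in d) for k in set(k for d in ini_dict for k in d)}
--         for key,value in (result.items()):
--             if value<0:
--                 result[key]=0
--         return result
-- ===== SOURCE B (Python) =====
-- def decrement_items(dct1, lst):
--     result = dict(dct1)
--     for x in lst:
--         result[x] = result.get(x, 0) - 1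
--     return {k: (v if v > 0 else 0) for k, v in result.items()}
-- ===== Notes on version B (the rewrite author's own statement) =====
-- stated objective: faster
-- what changed: A builds a negative-frequency dict by calling lst.count for every occurrence, merges it with dct1 by summing over the set union of both key sets, then clamps in a second in-place pass; B never counts: it copies dct1 once and decrements the entry by 1 for each list occurrence in a single pass, clamping while building the result.
import Mathlib
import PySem

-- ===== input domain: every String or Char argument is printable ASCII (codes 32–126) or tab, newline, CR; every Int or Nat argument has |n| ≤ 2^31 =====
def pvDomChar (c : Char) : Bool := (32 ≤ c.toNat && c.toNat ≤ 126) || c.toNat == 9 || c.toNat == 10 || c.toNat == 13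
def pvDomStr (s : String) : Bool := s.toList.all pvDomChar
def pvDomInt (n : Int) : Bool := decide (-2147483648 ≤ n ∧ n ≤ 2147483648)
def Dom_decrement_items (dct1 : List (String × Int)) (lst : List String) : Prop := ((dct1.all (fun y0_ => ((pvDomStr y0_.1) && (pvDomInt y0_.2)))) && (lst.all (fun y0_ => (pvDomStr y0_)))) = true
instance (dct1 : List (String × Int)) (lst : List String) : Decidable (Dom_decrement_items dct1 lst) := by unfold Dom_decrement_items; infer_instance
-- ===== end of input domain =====

-- B replaces A's count-and-merge (lst.count per occurrence, then a sum over the key union) by a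
-- single counting-free pass that decrements a copy of dct1 by 1 per occurrence, clamping on output.
-- Return dicts are compared as dicts (key order immaterial); ports fix the first-occurrence order.

-- ===== PORT A =====
def decrement_items (dct1 : List (String × Int)) (lst : List String) : List (String × Int) :=
  let d1 : PySem.Dict String Int := PySem.Dict.mk dct1
  -- dct2 = {i: -lst.count(i) for i in lst}
  let dct2 : PySem.Dict String Int :=
    lst.foldl (fun d i => d.insert i (-(PySem.List.count lst i : Int))) PySem.Dict.empty
  let ini_dict : List (PySem.Dict String Int) := [d1, dct2]
  -- result = {k: sum(d[k] for d in ini_dict if k in d) for k in set(k for d in ini_dict for k in d)}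
  let ks : PySem.Set String := PySem.Set.ofList (ini_dict.flatMap (fun d => d.keys))
  let result : PySem.Dict String Int :=
    ks.foldl (fun r k =>
      r.insert k (ini_dict.foldl (fun s d => if d.contains k then s + d.getD k 0 else s) 0))
      PySem.Dict.empty
  -- for key, value in result.items(): if value < 0: result[key] = 0
  let result := result.items.foldl (fun r kv => if kv.2 < 0 then r.insert kv.1 0 else r) result
  result.items

-- ===== PORT B =====
def decrement_items_alt (dct1 : List (String × Int)) (lst : List String) : List (String × Int) :=
  -- result = dict(dct1)
  let result : PySem.Dict String Int := PySem.Dict.mk dct1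
  -- for x in lst: result[x] = result.get(x, 0) - 1
  let result := lst.foldl (fun r x => r.insert x (r.getD x 0 - 1)) result
  -- {k: (v if v > 0 else 0) for k, v in result.items()}
  result.items.map (fun kv => (kv.1, if kv.2 > 0 then kv.2 else 0))

-- ===== PRECONDITION & SPEC =====
-- dct1 stands for a Python dict, whose keys are necessarily distinct; association lists with
-- duplicate keys do not arise from any Python call and the two ports resolve them differently.
def Pre_decrement_items (dct1 : List (String × Int)) (lst : List String) : Prop :=
  (dct1.map Prod.fst).Nodup
instance (dct1 : List (String × Int)) (lst : List String) : Decidable (Pre_decrement_items dct1 lst) := by unfold Pre_decrement_items; infer_instance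

def pvWitness_decrement_items : (List (String × Int)) × List String :=
  ([("pen", 5), ("ink", 1)], ["pen", "book", "pen"])

def Spec_decrement_items (dct1 : List (String × Int)) (lst : List String) (out : List (String × Int)) : Prop := out = decrement_items_alt dct1 lst
instance (dct1 : List (String × Int)) (lst : List String) (out : List (String × Int)) : Decidable (Spec_decrement_items dct1 lst out) := by unfold Spec_decrement_items; infer_instance

-- ===== CLAIM (what is proved, stated in full; the proofs are below) =====
def Claim_equal_decrement_items : Prop := ∀ (dct1 : List (String × Int)) (lst : List String), Dom_decrement_items dct1 lst → Pre_decrement_items dct1 lst → Spec_decrement_items dct1 lst (decrement_items dct1 lst)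

-- ===== LEMMAS AND PROOFS =====

theorem items_foldl_insert_const (lst : List String) (f : String → Int) :
    (lst.foldl (fun d i => d.insert i (f i)) PySem.Dict.empty).items
      = (PySem.Set.ofList lst).map (fun i => (i, f i)) := by
  induction lst using List.reverseRecOn with
  | nil => rfl
  | append_singleton xs x ih =>
    rw [List.foldl_append]
    have hkeys : (xs.foldl (fun d i => d.insert i (f i)) PySem.Dict.empty).keys
        = PySem.Set.ofList xs := by
      rw [PySem.Dict.keys_foldl_insert]
      simp [PySem.Set.update_nil_left]
    by_cases hx : x ∈ xs
    · have hc : (xs.foldl (fun d i => d.insert i (f i)) PySem.Dict.empty).contains x = true := by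
        rw [PySem.Dict.contains_eq_decide_mem_keys, hkeys]
        simp [PySem.Set.mem_ofList, hx]
      simp only [List.foldl]
      rw [PySem.Dict.items_insert_of_contains _ _ hc, ih, List.map_map]
      rw [PySem.Set.ofList_append_singleton]
      have hadd : PySem.Set.add (PySem.Set.ofList xs) x = PySem.Set.ofList xs := by
        simp [PySem.Set.add, PySem.Set.contains, PySem.Set.mem_ofList, hx]
      rw [hadd]
      apply List.map_congr_left
      intro i hi
      by_cases h : i = x <;> simp [h]
    · have hc : (xs.foldl (fun d i => d.insert i (f i)) PySem.Dict.empty).contains x = false := by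
        rw [PySem.Dict.contains_eq_decide_mem_keys, hkeys]
        simp [PySem.Set.mem_ofList, hx]
      simp only [List.foldl]
      rw [PySem.Dict.items_insert_of_not_contains _ _ hc, ih]
      rw [PySem.Set.ofList_append_singleton]
      have hadd : PySem.Set.add (PySem.Set.ofList xs) x = PySem.Set.ofList xs ++ [x] := by
        simp [PySem.Set.add, PySem.Set.contains, PySem.Set.mem_ofList, hx]
      rw [hadd]
      simp

-- B's per-occurrence decrement loop, characterised: each surviving dct1 entry ends up decreased by
-- the full multiplicity of its key in lst, and the keys of lst absent from dct1 are appended, in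
-- first-occurrence order, carrying minus their multiplicity.
theorem b_occ_items (lst : List String) (r : PySem.Dict String Int) (hr : r.keys.Nodup) :
    (lst.foldl (fun r x => r.insert x (r.getD x 0 - 1)) r).items
      = r.items.map (fun p => if p.1 ∈ lst then (p.1, p.2 - (PySem.List.count lst p.1 : Int)) else p)
        ++ ((PySem.List.dedup lst).filter (fun x => !r.contains x)).map
            (fun x => (x, (0:Int) - (PySem.List.count lst x : Int))) := by
  induction lst using List.reverseRecOn with
  | nil => simp [PySem.List.dedup]
  | append_singleton xs x ih =>
    rw [List.foldl_append]
    simp only [List.foldl_cons, List.foldl_nil]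
    set F := List.foldl (fun r x => r.insert x (r.getD x 0 - 1)) r xs with hF
    have hFnd : F.keys.Nodup := PySem.Dict.nodup_keys_foldl_insert _ _ _ hr
    have hFkeys : F.keys = PySem.Set.update r.keys xs := PySem.Dict.keys_foldl_insert _ _ _
    have hFcont : ∀ k, F.contains k = (r.contains k || decide (k ∈ xs)) := by
      intro k
      rw [PySem.Dict.contains_eq_decide_mem_keys, hFkeys, PySem.Set.update_eq_append_filter,
        PySem.Dict.contains_eq_decide_mem_keys]
      by_cases h1 : k ∈ r.keys <;> by_cases h2 : k ∈ xs <;>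
        simp [h1, h2, PySem.Set.mem_ofList, PySem.Set.contains]
    have hcnt : ∀ y : String, (PySem.List.count (xs ++ [x]) y : Int)
        = (PySem.List.count xs y : Int) + (if y = x then 1 else 0) := by
      intro y
      by_cases h : y = x
      · subst h; simp [PySem.List.count_eq, List.count_append]
      · have h' : ¬x = y := fun hh => h hh.symm
        simp [PySem.List.count_eq, List.count_append, h, h']
    by_cases hrx : r.contains x = true
    · -- x is a key of r
      have hxk : x ∈ r.keys := by
        rw [PySem.Dict.contains_eq_decide_mem_keys] at hrx; simpa using hrx
      obtain ⟨p0, hp0, hp01⟩ := List.mem_map.mp (show x ∈ r.items.map Prod.fst by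
        simpa [PySem.Dict.keys] using hxk)
      have hcx : F.contains x = true := by rw [hFcont, hrx]; simp
      have hg : F.getD x 0 = if x ∈ xs then p0.2 - (PySem.List.count xs x : Int) else p0.2 := by
        refine PySem.Dict.getD_of_mem_items F ?_ hFnd 0
        rw [ih]
        apply List.mem_append_left
        have hm := List.mem_map_of_mem
          (f := fun p : String × Int => if p.1 ∈ xs then (p.1, p.2 - (PySem.List.count xs p.1 : Int)) else p) hp0
        by_cases hxxs : x ∈ xs
        · simpa [hp01, hxxs] using hm
        · have hpp : p0 = (x, p0.2) := by rw [← hp01]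
          simpa [hp01, hxxs, ← hpp] using hm
      rw [PySem.Dict.items_insert_of_contains _ _ hcx, ih, List.map_append, List.map_map]
      have hded : (PySem.List.dedup (xs ++ [x])).filter (fun y => !r.contains y)
          = (PySem.List.dedup xs).filter (fun y => !r.contains y) := by
        by_cases h : x ∈ xs <;>
          simp [PySem.List.dedup_eq_ofList, PySem.Set.ofList_append_singleton, PySem.Set.add,
            PySem.Set.contains, PySem.Set.mem_ofList, h, List.filter_append, hrx]
      rw [hded]
      congr 1
      · -- the r.items part
        apply List.map_congr_left
        intro p hp
        simp only [Function.comp_apply]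
        by_cases hpx : p.1 = x
        · have hp2 : p.2 = p0.2 := by
            have e1 := PySem.Dict.getD_of_mem_items r (k := p.1) (v := p.2) (by simpa using hp) hr 0
            have e2 := PySem.Dict.getD_of_mem_items r (k := x) (v := p0.2)
              (by simpa [← hp01] using hp0) hr 0
            rw [hpx] at e1; rw [e2] at e1; exact e1.symm
          have hmem : p.1 ∈ xs ++ [x] := by simp [hpx]
          rw [if_pos hmem]
          by_cases hxxs : x ∈ xs
          · simp only [hpx, hxxs, if_true, beq_self_eq_true, hg, hcnt, hp2]
            ring_nf
          · have hc0 : (PySem.List.count xs x : Int) = 0 := by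
              simp [PySem.List.count_eq, List.count_eq_zero_of_not_mem hxxs]
            simp only [hpx, hxxs, if_false, beq_self_eq_true, if_true, hg, hcnt, hp2, hc0]
            ring_nf
        · have hmem : (p.1 ∈ xs ++ [x]) ↔ (p.1 ∈ xs) := by simp [hpx]
          by_cases hxxs : p.1 ∈ xs
          · simp only [hxxs, if_true, hmem.mpr hxxs, hcnt, hpx, if_false, beq_iff_eq]
            simp [hpx, hxxs, hmem, hcnt]
          · simp [hxxs, hmem, hpx]
      · -- the fresh part
        rw [List.map_map]
        apply List.map_congr_left
        intro y hy
        obtain ⟨hy1, hy2⟩ := List.mem_filter.mp hy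
        have hyx : y ≠ x := by
          intro h; rw [h] at hy2; rw [hrx] at hy2; simp at hy2
        simp [hyx, Ne.symm hyx, PySem.List.count_eq, List.count_append]
    · -- x is not a key of r
      have hrx' : r.contains x = false := by simpa using hrx
      have hxnk : x ∉ r.keys := by
        rw [PySem.Dict.contains_eq_decide_mem_keys] at hrx'; simpa using hrx'
      have hpx : ∀ p ∈ r.items, p.1 ≠ x := by
        intro p hp h
        exact hxnk (h ▸ (by simpa [PySem.Dict.keys] using List.mem_map_of_mem (f := Prod.fst) hp))
      by_cases hxxs : x ∈ xs
      · -- x was already seen in xs: its entry sits in the fresh part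
        have hcx : F.contains x = true := by rw [hFcont]; simp [hxxs]
        have hg : F.getD x 0 = 0 - (PySem.List.count xs x : Int) := by
          refine PySem.Dict.getD_of_mem_items F ?_ hFnd 0
          rw [ih]
          apply List.mem_append_right
          exact List.mem_map_of_mem (List.mem_filter.mpr
            ⟨by simpa [PySem.List.mem_dedup] using hxxs, by simp [hrx']⟩)
        rw [PySem.Dict.items_insert_of_contains _ _ hcx, ih, List.map_append, List.map_map]
        have hded : PySem.List.dedup (xs ++ [x]) = PySem.List.dedup xs := by
          simp [PySem.List.dedup_eq_ofList, PySem.Set.ofList_append_singleton, PySem.Set.add,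
            PySem.Set.contains, PySem.Set.mem_ofList, hxxs]
        rw [hded]
        congr 1
        · apply List.map_congr_left
          intro p hp
          have h1 : p.1 ≠ x := hpx p hp
          have hmem : (p.1 ∈ xs ++ [x]) ↔ (p.1 ∈ xs) := by simp [h1]
          by_cases h2 : p.1 ∈ xs
          · simp [h2, hmem, hcnt, h1, Ne.symm h1, List.count_singleton, PySem.List.count_eq, List.count_append]
          · simp [h2, hmem, h1]
        · rw [List.map_map]
          apply List.map_congr_left
          intro y hy
          obtain ⟨hy1, hy2⟩ := List.mem_filter.mp hy
          by_cases hyx : y = x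
          · simp [hyx, hg, hcnt]
            ring_nf
          · simp [hyx, Ne.symm hyx, PySem.List.count_eq, List.count_append]
      · -- x is brand new: appended
        have hcx : F.contains x = false := by rw [hFcont, hrx']; simp [hxxs]
        have hg : F.getD x 0 = 0 := PySem.Dict.getD_of_not_contains F 0 hcx
        rw [PySem.Dict.items_insert_of_not_contains _ _ hcx, ih, hg]
        have hded : PySem.List.dedup (xs ++ [x]) = PySem.List.dedup xs ++ [x] := by
          simp [PySem.List.dedup_eq_ofList, PySem.Set.ofList_append_singleton, PySem.Set.add,
            PySem.Set.contains, PySem.Set.mem_ofList, hxxs]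
        have hc0 : (PySem.List.count xs x : Int) = 0 := by
          simp [PySem.List.count_eq, List.count_eq_zero_of_not_mem hxxs]
        rw [hded, List.filter_append, List.map_append, ← List.append_assoc]
        congr 1
        · congr 1
          · apply List.map_congr_left
            intro p hp
            have h1 : p.1 ≠ x := hpx p hp
            have hmem : (p.1 ∈ xs ++ [x]) ↔ (p.1 ∈ xs) := by simp [h1]
            by_cases h2 : p.1 ∈ xs
            · simp [h2, hmem, hcnt, h1, Ne.symm h1, List.count_singleton, PySem.List.count_eq, List.count_append]
            · simp [h2, hmem, h1]
          · apply List.map_congr_left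
            intro y hy
            have hyx : y ≠ x := by
              intro h
              exact hxxs (by simpa [PySem.List.mem_dedup, h] using List.mem_of_mem_filter hy)
            simp [hyx, Ne.symm hyx, PySem.List.count_eq, List.count_append]
        · simp [hrx', List.count_singleton, PySem.List.count_eq, List.count_append,
            List.count_eq_zero_of_not_mem hxxs]

theorem clamp_items (L : List (String × Int)) (r : PySem.Dict String Int)
    (hnd : r.keys.Nodup) (hc : ∀ p ∈ L, r.contains p.1 = true) :
    (L.foldl (fun r kv => if kv.2 < 0 then r.insert kv.1 0 else r) r).items
      = r.items.map (fun p =>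
          if p.1 ∈ (L.filter (fun q => decide (q.2 < 0))).map Prod.fst then (p.1, (0:Int)) else p) := by
  induction L generalizing r with
  | nil =>
    simp
  | cons q L ih =>
    simp only [List.foldl_cons]
    by_cases hq : q.2 < 0
    · rw [if_pos hq]
      have hcq : r.contains q.1 = true := hc q (List.mem_cons_self ..)
      rw [ih (r.insert q.1 0) (PySem.Dict.nodup_keys_insert _ _ _ hnd) ?hcs]
      case hcs =>
        intro p hp
        rw [PySem.Dict.contains_insert]
        rw [hc p (List.mem_cons_of_mem _ hp)]
        simp
      rw [PySem.Dict.items_insert_of_contains _ _ hcq, List.map_map]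
      apply List.map_congr_left
      intro p hp
      rw [List.filter_cons, if_pos (show decide (q.2 < 0) = true by simpa using hq)]
      by_cases hpq : p.1 = q.1
      · simp only [Function.comp_apply, hpq, beq_self_eq_true, if_true]
        simp [ite_self]
      · simp only [Function.comp_apply, beq_iff_eq, hpq, if_false]
        have hiff : (p.1 ∈ q.1 :: (L.filter (fun q => decide (q.2 < 0))).map Prod.fst)
            ↔ (p.1 ∈ (L.filter (fun q => decide (q.2 < 0))).map Prod.fst) := by
          simp [hpq]
        rw [List.map_cons, if_congr hiff rfl rfl]
    · rw [if_neg hq]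
      rw [ih r hnd (fun p hp => hc p (List.mem_cons_of_mem _ hp))]
      apply List.map_congr_left
      intro p hp
      rw [List.filter_cons, if_neg (show ¬ decide (q.2 < 0) = true by simpa using hq)]

theorem clamp_items_self (r : PySem.Dict String Int) (hnd : r.keys.Nodup) :
    (r.items.foldl (fun r kv => if kv.2 < 0 then r.insert kv.1 0 else r) r).items
      = r.items.map (fun p => (p.1, if p.2 < 0 then (0:Int) else p.2)) := by
  rw [clamp_items r.items r hnd ?hc]
  case hc =>
    intro p hp
    rw [PySem.Dict.contains_eq_decide_mem_keys]
    simpa using PySem.Dict.mem_keys_of_mem_items _ hp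
  apply List.map_congr_left
  intro p hp
  by_cases hneg : p.2 < 0
  · have hm : p.1 ∈ (r.items.filter (fun q => decide (q.2 < 0))).map Prod.fst := by
      exact List.mem_map_of_mem (List.mem_filter.mpr ⟨hp, by simpa using hneg⟩)
    simp [hm, hneg]
  · have hm : p.1 ∉ (r.items.filter (fun q => decide (q.2 < 0))).map Prod.fst := by
      intro hmem
      obtain ⟨q, hqf, hq1⟩ := List.mem_map.mp hmem
      obtain ⟨hqi, hqneg⟩ := List.mem_filter.mp hqf
      have h1 := PySem.Dict.getD_of_mem_items (d := r) (k := q.1) (v := q.2) (by simpa using hqi) hnd 0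
      have h2 := PySem.Dict.getD_of_mem_items (d := r) (k := p.1) (v := p.2) (by simpa using hp) hnd 0
      rw [hq1] at h1
      rw [h2] at h1
      exact hneg (h1 ▸ (by simpa using hqneg))
    simp [hm, hneg]

-- ===== VERDICT (by name: the statement is the Claim_ definition above) =====
theorem decrement_items_spec : Claim_equal_decrement_items := by
  intro dct1 lst _ hpre
  unfold Spec_decrement_items decrement_items decrement_items_alt
  dsimp only
  -- names for the two intermediate dicts
  set d1 : PySem.Dict String Int := PySem.Dict.mk dct1 with hd1
  set dct2 : PySem.Dict String Int :=
    lst.foldl (fun d i => d.insert i (-(PySem.List.count lst i : Int))) PySem.Dict.empty with hd2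
  -- facts about dct2 (the frequency dict)
  have h2items : dct2.items = (PySem.Set.ofList lst).map (fun i => (i, -(PySem.List.count lst i : Int))) :=
    items_foldl_insert_const lst _
  have h2keys : dct2.keys = PySem.Set.ofList lst := by
    simp only [PySem.Dict.keys, h2items, List.map_map]
    simp [Function.comp_def]
  have h2nd : dct2.keys.Nodup := by rw [h2keys]; exact PySem.Set.nodup_ofList lst
  have h2cont : ∀ k, dct2.contains k = decide (k ∈ lst) := by
    intro k
    rw [PySem.Dict.contains_eq_decide_mem_keys, h2keys]
    simp [PySem.Set.mem_ofList]
  have h2getD : ∀ k ∈ lst, dct2.getD k 0 = -(PySem.List.count lst k : Int) := by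
    intro k hk
    refine PySem.Dict.getD_of_mem_items dct2 ?_ h2nd 0
    rw [h2items]
    exact List.mem_map_of_mem ((PySem.Set.mem_ofList lst k).mpr hk)
  -- facts about d1
  have h1keys : d1.keys = dct1.map Prod.fst := by simp [hd1, PySem.Dict.keys_mk]
  have h1nd : d1.keys.Nodup := by rw [h1keys]; exact hpre
  have h1cont : ∀ k, d1.contains k = decide (k ∈ dct1.map Prod.fst) := by
    intro k
    rw [PySem.Dict.contains_eq_decide_mem_keys, h1keys]
  have h1getD : ∀ p ∈ dct1, d1.getD p.1 0 = p.2 := by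
    intro p hp
    exact PySem.Dict.getD_of_mem_items d1 (by simpa [hd1] using hp) h1nd 0
  -- the merged value A computes at key k
  have hval : ∀ k, List.foldl (fun s d => if d.contains k = true then s + d.getD k 0 else s) 0 [d1, dct2]
      = (if d1.contains k = true then 0 + d1.getD k 0 else 0)
        + (if dct2.contains k = true then dct2.getD k 0 else 0) := by
    intro k
    simp only [List.foldl_cons, List.foldl_nil]
    by_cases h : dct2.contains k = true <;> simp [h]
  -- the key list A iterates over
  have hflat : List.flatMap (fun d : PySem.Dict String Int => d.keys) [d1, dct2]
      = dct1.map Prod.fst ++ PySem.Set.ofList lst := by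
    simp [List.flatMap, h1keys, h2keys]
  have hkeysA : PySem.Set.ofList (List.flatMap (fun d : PySem.Dict String Int => d.keys) [d1, dct2])
      = dct1.map Prod.fst
        ++ (PySem.Set.ofList lst).filter (fun y => !(PySem.Set.contains (dct1.map Prod.fst) y)) := by
    rw [hflat, PySem.Set.ofList_append, PySem.Set.ofList_eq_self_of_nodup _ hpre,
      PySem.Set.update_eq_append_filter, PySem.Set.ofList_ofList]
  -- A's merged dict, as an item list
  have hA1 : (List.foldl
        (fun r k => r.insert k
          (List.foldl (fun s d => if d.contains k = true then s + d.getD k 0 else s) 0 [d1, dct2]))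
        PySem.Dict.empty
        (PySem.Set.ofList (List.flatMap (fun d : PySem.Dict String Int => d.keys) [d1, dct2]))).items
      = (PySem.Set.ofList (List.flatMap (fun d : PySem.Dict String Int => d.keys) [d1, dct2])).map
          (fun k => (k,
            List.foldl (fun s d => if d.contains k = true then s + d.getD k 0 else s) 0 [d1, dct2])) := by
    have := PySem.Dict.items_foldl_insert_fresh
      (l := PySem.Set.ofList (List.flatMap (fun d : PySem.Dict String Int => d.keys) [d1, dct2]))
      (k := fun a => a)
      (v := fun k => List.foldl (fun s d => if d.contains k = true then s + d.getD k 0 else s) 0 [d1, dct2])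
      PySem.Dict.empty (by intro a _; exact PySem.Dict.contains_empty _)
      (by simp [PySem.Set.nodup_ofList])
    simpa using this
  have hAnd : (List.foldl
        (fun r k => r.insert k
          (List.foldl (fun s d => if d.contains k = true then s + d.getD k 0 else s) 0 [d1, dct2]))
        PySem.Dict.empty
        (PySem.Set.ofList (List.flatMap (fun d : PySem.Dict String Int => d.keys) [d1, dct2]))).keys.Nodup :=
    PySem.Dict.nodup_keys_foldl_insert _ _ PySem.Dict.empty PySem.Dict.nodup_keys_empty
  -- B's updated dict, as an item list
  have hB1 : (List.foldl (fun r x => r.insert x (r.getD x 0 - 1)) d1 lst).items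
      = dct1.map (fun p => if p.1 ∈ lst then (p.1, p.2 - (PySem.List.count lst p.1 : Int)) else p)
        ++ ((PySem.List.dedup lst).filter (fun x => !d1.contains x)).map
            (fun x => (x, (0:Int) - (PySem.List.count lst x : Int))) := by
    have := b_occ_items lst d1 h1nd
    simpa [hd1] using this
  -- the two pre-clamp item lists coincide
  have hmain : (PySem.Set.ofList (List.flatMap (fun d : PySem.Dict String Int => d.keys) [d1, dct2])).map
        (fun k => (k,
          List.foldl (fun s d => if d.contains k = true then s + d.getD k 0 else s) 0 [d1, dct2]))
      = (List.foldl (fun r x => r.insert x (r.getD x 0 - 1)) d1 lst).items := by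
    rw [hB1, hkeysA, List.map_append]
    congr 1
    · -- the dct1 part
      rw [List.map_map]
      apply List.map_congr_left
      intro p hp
      simp only [Function.comp_apply]
      have hc1 : d1.contains p.1 = true := by
        rw [h1cont]
        simpa using List.mem_map_of_mem (f := Prod.fst) hp
      rw [hval, hc1, if_pos rfl, h1getD p hp, h2cont]
      by_cases hm : p.1 ∈ lst
      · rw [if_pos (by simpa using hm)]
        rw [if_pos hm, h2getD p.1 hm]
        simp
        omega
      · rw [if_neg (by simpa using hm)]
        rw [if_neg hm]
        simp
    · -- the fresh-keys part
      rw [PySem.List.dedup_eq_ofList]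
      have hfil : (PySem.Set.ofList lst).filter (fun y => !(PySem.Set.contains (dct1.map Prod.fst) y))
          = (PySem.Set.ofList lst).filter (fun x => !d1.contains x) := by
        apply List.filter_congr
        intro y _
        rw [h1cont]
        simp [PySem.Set.contains]
      rw [hfil]
      apply List.map_congr_left
      intro k hk
      obtain ⟨hk1, hk2⟩ := List.mem_filter.mp hk
      have hklst : k ∈ lst := (PySem.Set.mem_ofList lst k).mp hk1
      have hc1 : d1.contains k = false := by simpa using hk2
      rw [hval, hc1]
      simp only [Bool.false_eq_true, if_false]
      rw [h2cont, if_pos (by simpa using hklst), h2getD k hklst]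
      simp
  -- assemble: clamp A's merged dict, and align the two clamping conventions pointwise
  rw [clamp_items_self _ hAnd, hA1, hmain]
  apply List.map_congr_left
  intro p _
  by_cases h : p.2 < 0
  · simp [h, show ¬ p.2 > 0 by omega]
  · by_cases h0 : p.2 > 0
    · simp [h, h0]
    · have hz : p.2 = 0 := by omega
      simp [hz]
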